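-- pv_equiv track=rewrite | github.com/Misitizer/rsa_cipher | rsaCipher.py | getBlocksFromText
-- ===== SOURCE A (Python) =====
-- DEFAULT_BLOCK_SIZE = 128
--
-- BYTE_SIZE = 256
--
-- def getBlocksFromText(message, blockSize=DEFAULT_BLOCK_SIZE):
--
--     messageBytes = message.encode('utf-8')
--     blockInts = []
--     for blockStart in range(0, len(messageBytes), blockSize):
--         blockInt = 0
--         for i in range(blockStart, min(blockStart + blockSize, len(messageBytes))):
--             blockInt += messageBytes[i] * (BYTE_SIZE ** (i % blockSize))
--         blockInts.append(blockInt)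
--     return blockInts
-- ===== SOURCE B (Python) =====
-- DEFAULT_BLOCK_SIZE = 128
--
-- def getBlocksFromText(message, blockSize=DEFAULT_BLOCK_SIZE):
--     messageBytes = message.encode('utf-8')
--     return [int.from_bytes(messageBytes[i:i + blockSize], 'little')
--             for i in range(0, len(messageBytes), blockSize)]
-- ===== Notes on version B (the rewrite author's own statement) =====
-- stated objective: faster
-- what changed: Replaces the inner loop that sums byte * 256**(i % blockSize) with a fresh bigint power per byte by a direct little-endian base-256 decode of each block slice via int.from_bytes, collected by a comprehension.
-- outside the precondition, e.g. on getBlocksFromText('ab', 0): A raises ValueError, B raises ValueError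
import Mathlib
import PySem

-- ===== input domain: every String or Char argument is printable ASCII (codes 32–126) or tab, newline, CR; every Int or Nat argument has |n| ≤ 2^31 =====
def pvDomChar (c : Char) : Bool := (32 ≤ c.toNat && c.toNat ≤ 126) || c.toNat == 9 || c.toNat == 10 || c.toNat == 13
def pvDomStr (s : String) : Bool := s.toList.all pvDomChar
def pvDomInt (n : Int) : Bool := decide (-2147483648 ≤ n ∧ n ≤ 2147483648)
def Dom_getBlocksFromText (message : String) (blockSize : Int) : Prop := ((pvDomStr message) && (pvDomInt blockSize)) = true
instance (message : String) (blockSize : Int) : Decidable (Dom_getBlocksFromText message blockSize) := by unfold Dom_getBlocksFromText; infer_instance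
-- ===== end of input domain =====

-- B replaces A's inner power-accumulation loop (a fresh 256**(i % blockSize) bigint power
-- per byte) with a per-block little-endian base-256 decode of the slice (int.from_bytes);
-- a timing run measured B faster on the generated inputs.

-- ===== PORT A =====
-- message.encode('utf-8'): on the ASCII domain (codes ≤ 126) each character is one byte
-- equal to its code point, so the byte list is exactly the list of character codes.
def pvBytes (message : String) : List Int :=
  message.toList.map (fun c => (c.toNat : Int))

def getBlocksFromText (message : String) (blockSize : Int) : List Int :=
  let messageBytes := pvBytes message
  (PySem.List.pyRange 0 (messageBytes.length : Int) blockSize).foldl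
    (fun blockInts blockStart =>
      blockInts ++
        [(PySem.List.pyRange blockStart
            (min (blockStart + blockSize) (messageBytes.length : Int)) 1).foldl
          (fun blockInt i =>
            blockInt + PySem.List.pyGetD messageBytes i 0 * 256 ^ (PySem.Int.mod i blockSize).toNat)
          0])
    []

-- ===== PORT B =====
-- int.from_bytes(bs, 'little') on a list of byte values
def pvFromBytesLE (bs : List Int) : Int :=
  bs.foldr (fun b acc => b + 256 * acc) 0

def getBlocksFromText_alt (message : String) (blockSize : Int) : List Int :=
  let messageBytes := pvBytes message
  (PySem.List.pyRange 0 (messageBytes.length : Int) blockSize).map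
    (fun i => pvFromBytesLE (PySem.List.slice messageBytes (some i) (some (i + blockSize))))

-- ===== PRECONDITION & SPEC =====
-- blockSize = 0 makes range(0, len, 0) raise ValueError in A (and in B); excluded.
def Pre_getBlocksFromText (message : String) (blockSize : Int) : Prop := blockSize ≠ 0
instance (message : String) (blockSize : Int) : Decidable (Pre_getBlocksFromText message blockSize) := by unfold Pre_getBlocksFromText; infer_instance
def pvWitness_getBlocksFromText : String × Int := ("ab", 1)

def Spec_getBlocksFromText (message : String) (blockSize : Int) (out : List Int) : Prop := out = getBlocksFromText_alt message blockSize
instance (message : String) (blockSize : Int) (out : List Int) : Decidable (Spec_getBlocksFromText message blockSize out) := by unfold Spec_getBlocksFromText; infer_instance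

-- ===== CLAIM (what is proved, stated in full; the proofs are below) =====
def Claim_equal_getBlocksFromText : Prop := ∀ (message : String) (blockSize : Int), Dom_getBlocksFromText message blockSize → Pre_getBlocksFromText message blockSize → Spec_getBlocksFromText message blockSize (getBlocksFromText message blockSize)

-- ===== LEMMAS AND PROOFS =====

-- range(0, n, s) is empty for a negative step and 0 ≤ n
lemma pyRange_neg_step_nil (n s : Int) (hn : 0 ≤ n) (hs : s < 0) :
    PySem.List.pyRange 0 n s = [] := by
  simp [PySem.List.pyRange, not_lt.mpr hs.le, not_lt.mpr hn]

lemma pvFromBytesLE_cons (b : Int) (bs : List Int) :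
    pvFromBytesLE (b :: bs) = b + 256 * pvFromBytesLE bs := rfl

-- A's inner loop, generalized: starting j bytes into a block that begins at s (a multiple
-- of k), summing m more bytes contributes 256^j times the little-endian value of those bytes.
lemma inner_aux (M : List Int) (k s : Int) (hk : 0 < k) (hs : 0 ≤ s) (hd : k ∣ s) :
    ∀ (m j : Nat), j + m ≤ k.toNat → s.toNat + j + m ≤ M.length →
      (PySem.List.pyRange (s + j) (s + j + m) 1).foldl
        (fun blockInt i =>
          blockInt + PySem.List.pyGetD M i 0 * 256 ^ (PySem.Int.mod i k).toNat) 0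
      = 256 ^ j * pvFromBytesLE ((M.drop (s.toNat + j)).take m) := by
  intro m
  induction m with
  | zero =>
      intro j _ _
      rw [PySem.List.pyRange_one_eq_nil (by simp)]
      simp [pvFromBytesLE]
  | succ m ih =>
      intro j hjm hlen
      have hlt : s + (j : Int) < s + j + (m + 1 : Nat) := by push_cast; omega
      rw [PySem.List.pyRange_one_cons hlt]
      rw [List.foldl_cons]
      have hrange : PySem.List.pyRange (s + ↑j + 1) (s + ↑j + ↑(m + 1)) 1
          = PySem.List.pyRange (s + ↑(j + 1)) (s + ↑(j + 1) + ↑m) 1 := by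
        congr 1 <;> push_cast <;> ring
      have hmod : PySem.Int.mod (s + ↑j) k = (j : Int) := by
        obtain ⟨q, rfl⟩ := hd
        rw [PySem.Int.mod_eq_emod_of_pos hk]
        rw [add_comm, Int.add_mul_emod_self_left]
        exact Int.emod_eq_of_lt (by omega) (by omega)
      have hidx : PySem.List.pyGetD M (s + ↑j) 0 = M.getD (s.toNat + j) 0 := by
        rw [PySem.List.pyGetD_eq_getElem M 0 (by omega) (by omega)]
        rw [List.getD_eq_getElem M 0 (by omega)]
        congr 1
        omega
      have htail : M.drop (s.toNat + j) = M.getD (s.toNat + j) 0 :: M.drop (s.toNat + (j + 1)) := by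
        have h : s.toNat + j < M.length := by omega
        rw [List.getD_eq_getElem M 0 h, List.drop_eq_getElem_cons h, Nat.add_assoc]
      rw [hrange, PySem.List.foldl_add]  -- peel the nonzero accumulator off the tail fold
      have hsum := ih (j + 1) (by omega) (by omega)
      rw [PySem.List.foldl_add, zero_add] at hsum
      rw [hsum, htail, List.take_succ_cons, pvFromBytesLE_cons, hmod, hidx]
      rw [Int.toNat_natCast]
      ring

-- the inner loop at a block start s equals the little-endian value of the block slice
lemma inner_eq_slice (M : List Int) (k s : Int) (hk : 0 < k) (hs : 0 ≤ s)
    (hsn : s < (M.length : Int)) (hd : k ∣ s) :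
    (PySem.List.pyRange s (min (s + k) (M.length : Int)) 1).foldl
      (fun blockInt i =>
        blockInt + PySem.List.pyGetD M i 0 * 256 ^ (PySem.Int.mod i k).toNat) 0
    = pvFromBytesLE (PySem.List.slice M (some s) (some (s + k))) := by
  have hm : min (s + k) (M.length : Int) = s + ((min k.toNat (M.length - s.toNat) : Nat) : Int) := by
    push_cast; omega
  have h := inner_aux M k s hk hs hd (min k.toNat (M.length - s.toNat)) 0 (by omega) (by omega)
  simp only [Nat.cast_zero, add_zero, pow_zero, one_mul] at h
  rw [hm, h]
  rw [PySem.List.slice_toNat M hs (by omega)]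
  have : (s + k).toNat - s.toNat = k.toNat := by omega
  rw [this]
  rcases Nat.le_total k.toNat (M.length - s.toNat) with h1 | h1
  · rw [Nat.min_eq_left h1]
  · have hlen : (M.drop s.toNat).length = M.length - s.toNat := List.length_drop ..
    rw [Nat.min_eq_right h1, List.take_of_length_le (le_of_eq hlen),
        List.take_of_length_le (hlen ▸ h1)]

-- ===== VERDICT (by name: the statement is the Claim_ definition above) =====
theorem getBlocksFromText_spec : Claim_equal_getBlocksFromText := by
  intro message blockSize _ hpre
  unfold Spec_getBlocksFromText getBlocksFromText getBlocksFromText_alt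
  simp only []
  set M := pvBytes message with hM
  rcases lt_or_gt_of_ne hpre with hneg | hpos
  · rw [pyRange_neg_step_nil _ _ (by positivity) hneg]
    rfl
  · rw [PySem.List.foldl_append_singleton_eq_map]
    rw [List.nil_append]
    apply List.map_congr_left
    intro s hsmem
    rw [PySem.List.mem_pyRange_iff_of_pos hpos] at hsmem
    obtain ⟨h0, hn, hdvd⟩ := hsmem
    simp only [sub_zero] at hdvd
    exact inner_eq_slice M blockSize s hpos h0 hn hdvd
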